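-- pv_equiv track=rewrite | github.com/BSI-UFU/Sistemas_Operacionais_Trabalhos | CPU_tarefas_rev02_01.py | _compactar_historico
-- ===== SOURCE A (Python) =====
-- def _compactar_historico(historico_bruto):
--     if not historico_bruto: return []
--     compactado = []
--     atual_nome, inicio_tempo = historico_bruto[0]
--     curr_time = inicio_tempo
--
--     for i in range(1, len(historico_bruto)):
--         nome, t = historico_bruto[i]
--         if nome != atual_nome or t != curr_time + 1:
--             compactado.append((atual_nome, inicio_tempo, curr_time + 1))
--             atual_nome = nome
--             inicio_tempo = t
--         curr_time = t
--     compactado.append((atual_nome, inicio_tempo, curr_time + 1))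
--     return compactado
-- ===== SOURCE B (Python) =====
-- def _compactar_historico(historico_bruto):
--     out = []
--     resto = historico_bruto
--     while resto:
--         nome, inicio = resto[0]
--         j = 1
--         while j < len(resto) and resto[j][0] == nome and resto[j][1] == resto[j - 1][1] + 1:
--             j += 1
--         out.append((nome, inicio, resto[j - 1][1] + 1))
--         resto = resto[j:]
--     return out
-- ===== Notes on version B (the rewrite author's own statement) =====
-- stated objective: alternative
-- what changed: Replaced A's single accumulator pass (carrying current name/start/time and flushing on breaks) by run-splitting: an outer loop that peels one maximal contiguous same-name run off the front with an inner scan, emits it, and continues on the remainder.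
import Mathlib
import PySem

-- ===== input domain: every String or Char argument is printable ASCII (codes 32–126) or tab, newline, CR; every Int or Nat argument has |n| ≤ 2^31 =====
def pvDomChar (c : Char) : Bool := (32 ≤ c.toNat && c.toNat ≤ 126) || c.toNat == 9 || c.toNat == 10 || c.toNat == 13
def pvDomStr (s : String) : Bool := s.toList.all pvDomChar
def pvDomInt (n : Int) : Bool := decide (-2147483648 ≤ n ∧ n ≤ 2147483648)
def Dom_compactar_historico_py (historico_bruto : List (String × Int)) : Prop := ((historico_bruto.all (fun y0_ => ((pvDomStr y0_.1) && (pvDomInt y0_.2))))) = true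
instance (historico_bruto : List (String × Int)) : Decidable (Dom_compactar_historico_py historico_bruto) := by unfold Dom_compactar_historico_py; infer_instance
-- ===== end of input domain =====

-- B replaces A's single accumulator pass by run-splitting recursion (peel one maximal contiguous run, recurse); alternative decomposition, same cost.


-- ===== PORT A =====
-- A: one forward pass carrying (compactado, atual_nome, inicio_tempo, curr_time), flushing a triple on each break.
def compactar_historico_py (historico_bruto : List (String × Int)) : List (String × Int × Int) :=
  match historico_bruto with
  | [] => []
  | (n0, t0) :: rest =>
    let st := rest.foldl
      (fun (s : List (String × Int × Int) × String × Int × Int) (p : String × Int) =>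
        let (compactado, atual_nome, inicio_tempo, curr_time) := s
        let (nome, t) := p
        if nome ≠ atual_nome ∨ t ≠ curr_time + 1 then
          (compactado ++ [(atual_nome, inicio_tempo, curr_time + 1)], nome, t, t)
        else
          (compactado, atual_nome, inicio_tempo, t))
      ([], n0, t0, t0)
    st.1 ++ [(st.2.1, st.2.2.1, st.2.2.2 + 1)]

-- ===== PORT B =====
-- B helper: the inner scan — extend the run while the next entry has the same name and previous time + 1;
-- returns the run's last time and the untouched remainder.
def pvTakeRun (nome : String) (prev : Int) : List (String × Int) → Int × List (String × Int)
  | [] => (prev, [])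
  | (n, t) :: rest =>
    if n = nome ∧ t = prev + 1 then pvTakeRun nome t rest else (prev, (n, t) :: rest)

theorem pvTakeRun_len (nome : String) (prev : Int) (l : List (String × Int)) :
    (pvTakeRun nome prev l).2.length ≤ l.length := by
  induction l generalizing prev with
  | nil => simp [pvTakeRun]
  | cons p rest ih =>
    obtain ⟨n, t⟩ := p
    simp only [pvTakeRun]
    split
    · exact le_trans (ih t) (Nat.le_succ _)
    · simp

-- B: outer loop peels one maximal contiguous same-name run off the front and recurses on the remainder.
def compactar_historico_py_alt : List (String × Int) → List (String × Int × Int)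
  | [] => []
  | (nome, inicio) :: rest =>
    let r := pvTakeRun nome inicio rest
    (nome, inicio, r.1 + 1) :: compactar_historico_py_alt r.2
termination_by l => l.length
decreasing_by
  simpa using Nat.lt_succ_of_le (pvTakeRun_len nome inicio rest)

-- ===== PRECONDITION & SPEC =====
def Spec_compactar_historico_py (historico_bruto : List (String × Int)) (out : List (String × Int × Int)) : Prop := out = compactar_historico_py_alt historico_bruto
instance (historico_bruto : List (String × Int)) (out : List (String × Int × Int)) : Decidable (Spec_compactar_historico_py historico_bruto out) := by unfold Spec_compactar_historico_py; infer_instance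

-- ===== CLAIM (what is proved, stated in full; the proofs are below) =====
def Claim_equal_compactar_historico_py : Prop := ∀ (historico_bruto : List (String × Int)), Dom_compactar_historico_py historico_bruto → Spec_compactar_historico_py historico_bruto (compactar_historico_py historico_bruto)

-- ===== LEMMAS AND PROOFS =====

-- Loop invariant: A's fold from any state, with the final flush appended, equals the
-- already-emitted prefix followed by B's output for the current open run and remainder.
theorem pv_key (rest : List (String × Int)) :
    ∀ (comp : List (String × Int × Int)) (an : String) (it ct : Int),
    (let st := rest.foldl
        (fun (s : List (String × Int × Int) × String × Int × Int) (p : String × Int) =>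
          let (compactado, atual_nome, inicio_tempo, curr_time) := s
          let (nome, t) := p
          if nome ≠ atual_nome ∨ t ≠ curr_time + 1 then
            (compactado ++ [(atual_nome, inicio_tempo, curr_time + 1)], nome, t, t)
          else
            (compactado, atual_nome, inicio_tempo, t))
        (comp, an, it, ct)
     st.1 ++ [(st.2.1, st.2.2.1, st.2.2.2 + 1)])
    = comp ++ ((an, it, (pvTakeRun an ct rest).1 + 1)
               :: compactar_historico_py_alt (pvTakeRun an ct rest).2) := by
  induction rest with
  | nil => intro comp an it ct; simp [pvTakeRun, compactar_historico_py_alt]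
  | cons p rest ih =>
    intro comp an it ct
    obtain ⟨nome, t⟩ := p
    by_cases h : nome = an ∧ t = ct + 1
    · have hcond : ¬ (nome ≠ an ∨ t ≠ ct + 1) := by
        push_neg; exact h
      simp only [List.foldl_cons, if_neg hcond]
      rw [ih comp an it t]
      simp [pvTakeRun, if_pos h]
    · have hcond : (nome ≠ an ∨ t ≠ ct + 1) := by
        by_contra hc; push_neg at hc; exact h ⟨hc.1, hc.2⟩
      simp only [List.foldl_cons, if_pos hcond]
      rw [ih (comp ++ [(an, it, ct + 1)]) nome t t]
      simp [compactar_historico_py_alt, pvTakeRun, if_neg h]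

-- ===== VERDICT (by name: the statement is the Claim_ definition above) =====
theorem compactar_historico_py_spec : Claim_equal_compactar_historico_py := by
  intro h _
  unfold Spec_compactar_historico_py
  match h with
  | [] => simp [compactar_historico_py, compactar_historico_py_alt]
  | (n0, t0) :: rest =>
    have hk := pv_key rest [] n0 t0 t0
    simp only [List.nil_append] at hk
    show (let st := rest.foldl _ ([], n0, t0, t0); st.1 ++ [(st.2.1, st.2.2.1, st.2.2.2 + 1)]) = _
    rw [hk]
    simp [compactar_historico_py_alt]
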